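-- pv_equiv track=rewrite | github.com/RascalTwo/DailyProblem | problems/DailyCoding/207/solve.py | solve
-- ===== SOURCE A (Python) =====
-- from typing import Dict, List, Set
--
-- class Node:
-- 	def __init__(self, label: int):
-- 		self.label = label
-- 		self.connections: Set[Node] = set()
--
-- 	def connect_to(self, other: 'Node'):
-- 		self.connections.add(other)
--
-- def solve(matrix: List[List[int]]):
-- 	node_map: Dict[int, Node] = {}
-- 	for r, row in enumerate(matrix):
-- 		node = node_map.setdefault(r, Node(r))
-- 		for c, col in enumerate(row):
-- 			if not col or c == r:
-- 				continue
-- 			other = node_map.setdefault(c, Node(c))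
-- 			node.connections.add(other)
-- 			other.connections.add(node)
-- 	nodes = list(node_map.values())
--
-- 	groups: List[Set[Node]] = []
-- 	while nodes:
-- 		node = nodes.pop()
-- 		for group in groups:
-- 			if not any(other in group for other in node.connections):
-- 				group.add(node)
-- 				break
-- 		else:
-- 			groups.append(set([node]))
--
-- 	return len(groups) == 2
-- ===== SOURCE B (Python) =====
-- def solve(matrix):
--     # One sentence: greedy coloring with a node->group-index map instead of scanning a list of group sets.
--     adj = {}
--     for r, row in enumerate(matrix):
--         if r not in adj:
--             adj[r] = set()
--         for c, v in enumerate(row):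
--             if v and c != r:
--                 if c not in adj:
--                     adj[c] = set()
--                 adj[r].add(c)
--                 adj[c].add(r)
--     color = {}
--     num_groups = 0
--     for node in reversed(list(adj)):
--         blocked = {color[n] for n in adj[node] if n in color}
--         g = 0
--         while g in blocked:
--             g += 1
--         if g == num_groups:
--             num_groups += 1
--         color[node] = g
--     return num_groups == 2
-- ===== Notes on version B (the rewrite author's own statement) =====
-- stated objective: faster
-- what changed: Replaces A's per-node scan over a growing list of group SETS (membership test of every neighbor against every group) with a node-to-group-index map: each node collects its neighbors' group indices once and takes the first free index, so the inner group scans disappear.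
import Mathlib
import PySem

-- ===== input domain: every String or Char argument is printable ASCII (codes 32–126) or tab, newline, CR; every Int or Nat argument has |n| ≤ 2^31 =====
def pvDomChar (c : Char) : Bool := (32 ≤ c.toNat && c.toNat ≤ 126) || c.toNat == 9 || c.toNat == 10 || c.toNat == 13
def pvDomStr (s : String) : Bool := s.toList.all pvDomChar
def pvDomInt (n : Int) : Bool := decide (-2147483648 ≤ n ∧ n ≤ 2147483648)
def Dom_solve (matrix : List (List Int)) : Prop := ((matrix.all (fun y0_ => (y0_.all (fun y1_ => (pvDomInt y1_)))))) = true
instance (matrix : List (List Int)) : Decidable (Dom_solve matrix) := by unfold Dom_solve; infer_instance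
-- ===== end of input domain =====

-- B greedily colors nodes with a node→group-index map and first-free index instead of
-- scanning a list of group SETS per node (A); equal return value on all inputs.

-- ===== PORT A =====
-- node_map : label → connections (Node objects are unique per label; identity = label)
def solveRowA (d : PySem.Dict Int (PySem.Set Int)) (r : Int) (row : List Int) :
    PySem.Dict Int (PySem.Set Int) :=
  (PySem.List.enumerate row).foldl (fun d cv =>
    if cv.2 = 0 ∨ cv.1 = r then d          -- "if not col or c == r: continue"
    else
      let d := d.setdefault cv.1 (PySem.Set.empty : PySem.Set Int)
      let d := d.modify r PySem.Set.empty (fun s => PySem.Set.add s cv.1)   -- node.connections.add(other)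
      d.modify cv.1 PySem.Set.empty (fun s => PySem.Set.add s r)) d         -- other.connections.add(node)

def buildA (matrix : List (List Int)) : PySem.Dict Int (PySem.Set Int) :=
  (PySem.List.enumerate matrix).foldl (fun d rrow =>
    let d := d.setdefault rrow.1 (PySem.Set.empty : PySem.Set Int)
    solveRowA d rrow.1 rrow.2) PySem.Dict.empty

-- "for group in groups: if not any(other in group for other in node.connections): group.add(node); break / else: append"
def placeA (lbl : Int) (conns : PySem.Set Int) : List (PySem.Set Int) → List (PySem.Set Int)
  | [] => [PySem.Set.ofList [lbl]]
  | g :: gs =>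
    if List.any conns (fun o => PySem.Set.contains g o) then g :: placeA lbl conns gs
    else PySem.Set.add g lbl :: gs

def loopA : List (Int × PySem.Set Int) → List (PySem.Set Int) → List (PySem.Set Int)
  | [], groups => groups
  | n :: rest, groups => loopA rest (placeA n.1 n.2 groups)

-- "while nodes: node = nodes.pop()" consumes the list from the END: recurse over nodes.reverse
def solve (matrix : List (List Int)) : Bool :=
  decide ((loopA (buildA matrix).items.reverse []).length = 2)

-- ===== PORT B =====
def bEnsure (d : PySem.Dict Int (PySem.Set Int)) (k : Int) : PySem.Dict Int (PySem.Set Int) :=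
  if d.contains k then d else d.insert k (PySem.Set.empty : PySem.Set Int)   -- "if k not in adj: adj[k] = set()"

def solveRowB (d : PySem.Dict Int (PySem.Set Int)) (r : Int) (row : List Int) :
    PySem.Dict Int (PySem.Set Int) :=
  (PySem.List.enumerate row).foldl (fun d cv =>
    if cv.2 ≠ 0 ∧ cv.1 ≠ r then
      let d := bEnsure d cv.1
      let d := d.modify r PySem.Set.empty (fun s => PySem.Set.add s cv.1)   -- adj[r].add(c)
      d.modify cv.1 PySem.Set.empty (fun s => PySem.Set.add s r)            -- adj[c].add(r)
    else d) d

def buildB (matrix : List (List Int)) : PySem.Dict Int (PySem.Set Int) :=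
  (PySem.List.enumerate matrix).foldl (fun d rrow =>
    solveRowB (bEnsure d rrow.1) rrow.1 rrow.2) PySem.Dict.empty

-- "g = 0; while g in blocked: g += 1" — runs at most |blocked| times, so this fuel suffices
def firstFree (blocked : List Int) : Nat → Int → Int
  | 0, g => g
  | fuel+1, g => if blocked.contains g then firstFree blocked fuel (g+1) else g

def loopB (adj : PySem.Dict Int (PySem.Set Int)) :
    List Int → PySem.Dict Int Int → Int → Int
  | [], _, ng => ng
  | node :: rest, color, ng =>
    -- "blocked = {color[n] for n in adj[node] if n in color}" (set built from a set: order-safe)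
    let blocked : PySem.Set Int :=
      PySem.Set.ofList ((adj.getD node PySem.Set.empty).filterMap (fun n => color.get? n))
    let g := firstFree blocked (blocked.length + 1) 0
    loopB adj rest (color.insert node g) (if g = ng then ng + 1 else ng)

def solve_alt (matrix : List (List Int)) : Bool :=
  decide (loopB (buildB matrix) (buildB matrix).keys.reverse PySem.Dict.empty 0 = 2)

-- ===== PRECONDITION & SPEC =====
def Spec_solve (matrix : List (List Int)) (out : Bool) : Prop := out = solve_alt matrix
instance (matrix : List (List Int)) (out : Bool) : Decidable (Spec_solve matrix out) := by unfold Spec_solve; infer_instance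

-- ===== CLAIM (what is proved, stated in full; the proofs are below) =====
def Claim_equal_solve : Prop := ∀ (matrix : List (List Int)), Dom_solve matrix → Spec_solve matrix (solve matrix)

-- ===== LEMMAS AND PROOFS =====

lemma ensure_eq (d : PySem.Dict Int (PySem.Set Int)) (k : Int) :
    bEnsure d k = d.setdefault k PySem.Set.empty := by
  unfold bEnsure PySem.Dict.setdefault PySem.Dict.insert
  by_cases h : d.contains k = true <;> simp [h]

lemma rowB_eq (d : PySem.Dict Int (PySem.Set Int)) (r : Int) (row : List Int) :
    solveRowB d r row = solveRowA d r row := by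
  unfold solveRowA solveRowB
  congr 1
  funext d cv
  by_cases h1 : cv.2 = 0 <;> by_cases h2 : cv.1 = r <;>
    simp [h1, h2, ensure_eq]

lemma build_eq (matrix : List (List Int)) : buildB matrix = buildA matrix := by
  unfold buildA buildB
  congr 1
  funext d rrow
  simp [rowB_eq, ensure_eq]

-- keys stay Nodup through the build
lemma foldl_keys_nodup {α : Type} (step : PySem.Dict Int (PySem.Set Int) → α → PySem.Dict Int (PySem.Set Int))
    (h : ∀ d x, d.keys.Nodup → (step d x).keys.Nodup) :
    ∀ (l : List α) (d : PySem.Dict Int (PySem.Set Int)), d.keys.Nodup → (l.foldl step d).keys.Nodup := by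
  intro l
  induction l with
  | nil => intro d hd; exact hd
  | cons x xs ih => intro d hd; exact ih _ (h d x hd)

lemma nodup_setdefault (d : PySem.Dict Int (PySem.Set Int)) (k : Int) (v : PySem.Set Int)
    (h : d.keys.Nodup) : (d.setdefault k v).keys.Nodup := by
  unfold PySem.Dict.setdefault
  by_cases hc : d.contains k = true
  · simpa [hc] using h
  · have heq : (PySem.Dict.mk (d.items ++ [(k, v)])) = d.insert k v := by
      unfold PySem.Dict.insert; simp [hc]
    rw [if_neg hc, heq]
    exact PySem.Dict.nodup_keys_insert d k v h

lemma nodup_modify (d : PySem.Dict Int (PySem.Set Int)) (k : Int) (f : PySem.Set Int → PySem.Set Int)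
    (h : d.keys.Nodup) : (d.modify k PySem.Set.empty f).keys.Nodup := by
  unfold PySem.Dict.modify
  exact PySem.Dict.nodup_keys_insert _ _ _ h

lemma nodup_rowA (d : PySem.Dict Int (PySem.Set Int)) (r : Int) (row : List Int)
    (h : d.keys.Nodup) : (solveRowA d r row).keys.Nodup := by
  unfold solveRowA
  refine foldl_keys_nodup _ ?_ _ _ h
  intro d cv hd
  by_cases hc : cv.2 = 0 ∨ cv.1 = r
  · simpa [hc] using hd
  · simp only [if_neg hc]
    exact nodup_modify _ _ _ (nodup_modify _ _ _ (nodup_setdefault _ _ _ hd))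

lemma nodup_buildA (matrix : List (List Int)) : (buildA matrix).keys.Nodup := by
  unfold buildA
  refine foldl_keys_nodup _ ?_ _ _ ?_
  · intro d rrow hd
    exact nodup_rowA _ _ _ (nodup_setdefault _ _ _ hd)
  · exact PySem.Dict.nodup_keys_empty

lemma filter_succ_len (l : List Int) (g : Int) (hg : g ∈ l) :
    (l.filter (fun v => decide (g+1 ≤ v))).length < (l.filter (fun v => decide (g ≤ v))).length := by
  have h1 : l.filter (fun v => decide (g+1 ≤ v))
      = (l.filter (fun v => decide (g ≤ v))).filter (fun v => decide (g+1 ≤ v)) := by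
    rw [List.filter_filter]
    congr 1
    funext v
    by_cases h : g+1 ≤ v
    · simp [h, (by omega : g ≤ v)]
    · simp [h]
  rw [h1]
  refine List.length_filter_lt_length_iff_exists.mpr ⟨g, ?_, by simp⟩
  exact List.mem_filter.mpr ⟨hg, by simp⟩

lemma place_eq (lbl : Int) (conns : PySem.Set Int) (blocked : List Int) :
    ∀ (groups : List (PySem.Set Int)) (g : Int) (fuel : Nat),
      (blocked.filter (fun v => decide (g ≤ v))).length < fuel →
      (∀ (j : Nat) (h : j < groups.length),
        ((g + (j:Int)) ∈ blocked ↔ List.any conns (fun o => PySem.Set.contains (groups[j]) o) = true)) →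
      (∀ v ∈ blocked, g ≤ v → v < g + (groups.length : Int)) →
      g ≤ firstFree blocked fuel g ∧ firstFree blocked fuel g ≤ g + (groups.length : Int) ∧
      placeA lbl conns groups =
        (if h : (firstFree blocked fuel g - g).toNat < groups.length
         then groups.set (firstFree blocked fuel g - g).toNat
                (PySem.Set.add (groups[(firstFree blocked fuel g - g).toNat]) lbl)
         else groups ++ [PySem.Set.ofList [lbl]]) := by
  intro groups
  induction groups with
  | nil =>
    intro g fuel hfuel H1 H4
    have hgnot : g ∉ blocked := fun hgb => by
      have := H4 g hgb le_rfl
      simp at this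
    cases fuel with
    | zero => omega
    | succ f =>
      have hstep : firstFree blocked (f+1) g = g := by
        rw [firstFree, if_neg (by simpa using hgnot)]
      rw [hstep]
      refine ⟨le_rfl, by simp, ?_⟩
      simp [placeA]
  | cons G gs ih =>
    intro g fuel hfuel H1 H4
    cases fuel with
    | zero => omega
    | succ f =>
      by_cases hb : List.any conns (fun o => PySem.Set.contains G o) = true
      · have hgb : g ∈ blocked := by
          have := (H1 0 (by simp)).mpr (by simpa using hb)
          simpa using this
        have hcont : blocked.contains g = true := List.contains_iff_mem.mpr hgb
        have hfuel' : (blocked.filter (fun v => decide (g+1 ≤ v))).length < f := by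
          have := filter_succ_len blocked g hgb
          omega
        have H1' : ∀ (j : Nat) (h : j < gs.length),
            ((g+1 + (j:Int)) ∈ blocked ↔ List.any conns (fun o => PySem.Set.contains (gs[j]) o) = true) := by
          intro j hj
          have := H1 (j+1) (by simpa using Nat.succ_lt_succ hj)
          simpa [List.getElem_cons_succ, add_assoc, add_comm 1 (j:Int)] using this
        have H4' : ∀ v ∈ blocked, g+1 ≤ v → v < g+1 + (gs.length : Int) := by
          intro v hv hle
          have := H4 v hv (by omega)
          simp only [List.length_cons] at this
          push_cast at this ⊢
          omega
        obtain ⟨ihle, ihub, iheq⟩ := ih (g+1) f hfuel' H1' H4'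
        have hstep : firstFree blocked (f+1) g = firstFree blocked f (g+1) := by
          rw [firstFree, if_pos hcont]
        rw [hstep]
        generalize hr : firstFree blocked f (g+1) = r at ihle ihub iheq ⊢
        refine ⟨by omega, ?_, ?_⟩
        · simp only [List.length_cons]
          push_cast at ihub ⊢
          omega
        · have hplace : placeA lbl conns (G :: gs) = G :: placeA lbl conns gs := by
            rw [placeA, if_pos hb]
          rw [hplace, iheq]
          have hk : (r - g).toNat = (r - (g+1)).toNat + 1 := by omega
          by_cases hlt : (r - (g+1)).toNat < gs.length
          · rw [dif_pos hlt, dif_pos (by simp only [hk, List.length_cons]; omega)]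
            simp [hk, List.getElem_cons_succ]
          · rw [dif_neg hlt, dif_neg (by simp only [hk, List.length_cons]; omega)]
            simp
      · have hgnot : g ∉ blocked := by
          intro h'
          have := (H1 0 (by simp)).mp (by simpa using h')
          simp only [List.getElem_cons_zero] at this
          exact hb this
        have hstep : firstFree blocked (f+1) g = g := by
          rw [firstFree, if_neg (by simpa using hgnot)]
        rw [hstep]
        refine ⟨le_rfl, by omega, ?_⟩
        have h0 : (g - g).toNat = 0 := by omega
        rw [h0, dif_pos (by simp)]
        rw [placeA, if_neg hb]
        simp

lemma loop_eq (adj : PySem.Dict Int (PySem.Set Int)) :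
    ∀ (L : List (Int × PySem.Set Int)) (groups : List (PySem.Set Int))
      (color : PySem.Dict Int Int) (ng : Int),
      (∀ p ∈ L, adj.get? p.1 = some p.2) →
      (L.map Prod.fst).Nodup →
      (∀ p ∈ L, color.get? p.1 = none) →
      ng = (groups.length : Int) →
      (∀ lbl v, color.get? lbl = some v →
        ∃ (j : Nat) (h : j < groups.length), v = (j:Int) ∧ lbl ∈ groups[j]) →
      (∀ (j : Nat) (h : j < groups.length), ∀ lbl ∈ groups[j], color.get? lbl = some (j:Int)) →
      ((loopA L groups).length : Int) = loopB adj (L.map Prod.fst) color ng := by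
  intro L
  induction L with
  | nil =>
    intro groups color ng _ _ _ hng _ _
    simp [loopA, loopB, hng]
  | cons p rest ih =>
    intro groups color ng hadj hnd hnone hng inv1 inv2
    obtain ⟨lbl, conns⟩ := p
    have hget : adj.get? lbl = some conns := hadj (lbl, conns) (by simp)
    have hgetD : adj.getD lbl PySem.Set.empty = conns :=
      PySem.Dict.getD_of_get?_eq_some _ _ hget
    have hnonelbl : color.get? lbl = none := hnone (lbl, conns) (by simp)
    have hlblnot : ∀ (j : Nat) (h : j < groups.length), lbl ∉ groups[j] := by
      intro j h hmem
      have := inv2 j h lbl hmem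
      rw [hnonelbl] at this
      cases this
    set B : List Int := PySem.Set.ofList (conns.filterMap (fun n => color.get? n)) with hB
    have hmem : ∀ v : Int, v ∈ B ↔ ∃ n ∈ (conns : List Int), color.get? n = some v := by
      intro v
      rw [hB]
      rw [PySem.Set.mem_ofList]
      exact List.mem_filterMap
    have H1 : ∀ (j : Nat) (h : j < groups.length),
        (((0:Int) + (j:Int)) ∈ B ↔ List.any conns (fun o => PySem.Set.contains (groups[j]) o) = true) := by
      intro j hj
      simp only [zero_add]
      constructor
      · intro hv
        obtain ⟨n, hn, hcn⟩ := (hmem _).mp hv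
        obtain ⟨j', hj', hv', hmemg⟩ := inv1 n _ hcn
        have hjj : j' = j := by exact_mod_cast hv'.symm
        subst hjj
        exact List.any_eq_true.mpr ⟨n, hn, (PySem.Set.contains_iff _ _).mpr hmemg⟩
      · intro ha
        obtain ⟨n, hn, hcn⟩ := List.any_eq_true.mp ha
        exact (hmem _).mpr ⟨n, hn, inv2 j hj n ((PySem.Set.contains_iff _ _).mp hcn)⟩
    have H4 : ∀ v ∈ B, (0:Int) ≤ v → v < 0 + (groups.length : Int) := by
      intro v hv _
      obtain ⟨n, _, hcn⟩ := (hmem _).mp hv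
      obtain ⟨j', hj', hv', _⟩ := inv1 n _ hcn
      subst hv'
      omega
    have hfuel : (B.filter (fun v => decide ((0:Int) ≤ v))).length < B.length + 1 := by
      have := List.length_filter_le (fun v => decide ((0:Int) ≤ v)) B
      omega
    obtain ⟨hle, hub, heq⟩ := place_eq lbl conns B groups 0 (B.length + 1) hfuel H1 H4
    set r := firstFree B (B.length + 1) 0 with hr
    simp only [Int.sub_zero] at heq
    simp only [zero_add] at hub
    -- unfold one step of loopA and loopB
    have hA : loopA ((lbl, conns) :: rest) groups = loopA rest (placeA lbl conns groups) := rfl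
    have hBstep : loopB adj ((lbl :: rest.map Prod.fst)) color ng
        = loopB adj (rest.map Prod.fst) (color.insert lbl r)
            (if r = ng then ng + 1 else ng) := by
      rw [loopB, hgetD, ← hB, ← hr]
    rw [List.map_cons, hA, hBstep, heq]
    have hnd' : (rest.map Prod.fst).Nodup := (List.nodup_cons.mp hnd).2
    have hlblrest : lbl ∉ rest.map Prod.fst := (List.nodup_cons.mp hnd).1
    have hnone' : ∀ p ∈ rest, (color.insert lbl r).get? p.1 = none := by
      intro p hp
      rw [PySem.Dict.get?_insert]
      rw [if_neg (by
        intro h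
        exact hlblrest (h ▸ List.mem_map.mpr ⟨p, hp, rfl⟩))]
      exact hnone p (by simp [hp])
    have hadj' : ∀ p ∈ rest, adj.get? p.1 = some p.2 := fun p hp => hadj p (by simp [hp])
    by_cases hlt : r.toNat < groups.length
    · -- r picks an existing group
      have hrk : r = (r.toNat : Int) := by omega
      rw [dif_pos hlt]
      have hrne : r ≠ ng := by rw [hng]; omega
      rw [if_neg hrne]
      refine ih _ _ _ hadj' hnd' hnone' (by simp [List.length_set, hng]) ?_ ?_
      · -- inv1 preserved
        intro m v hmv
        rw [PySem.Dict.get?_insert] at hmv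
        by_cases hm : m = lbl
        · rw [if_pos hm] at hmv
          injection hmv with hv
          refine ⟨r.toNat, by simpa [List.length_set] using hlt, by omega, ?_⟩
          subst hm
          simp only [List.getElem_set, if_pos]
          exact (PySem.Set.mem_add _ _ _).mpr (Or.inr rfl)
        · rw [if_neg hm] at hmv
          obtain ⟨j, hj, hv, hmm⟩ := inv1 m v hmv
          refine ⟨j, by simpa [List.length_set] using hj, hv, ?_⟩
          simp only [List.getElem_set]
          by_cases hkj : r.toNat = j
          · rw [if_pos hkj]
            subst hkj
            exact (PySem.Set.mem_add _ _ _).mpr (Or.inl hmm)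
          · rw [if_neg hkj]
            exact hmm
      · -- inv2 preserved
        intro j hj m hm
        rw [List.length_set] at hj
        rw [PySem.Dict.get?_insert]
        simp only [List.getElem_set] at hm
        by_cases hkj : r.toNat = j
        · subst hkj
          rw [if_pos rfl] at hm
          rcases (PySem.Set.mem_add _ _ _).mp hm with hmm | hml
          · have hmne : m ≠ lbl := fun h => hlblnot _ hj (h ▸ hmm)
            rw [if_neg hmne]
            exact inv2 _ hj m hmm
          · rw [if_pos hml, ← hrk]
        · rw [if_neg hkj] at hm
          have hmne : m ≠ lbl := fun h => hlblnot j hj (h ▸ hm)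
          rw [if_neg hmne]
          exact inv2 j hj m hm
    · -- r opens a new group
      have hrlen : r = (groups.length : Int) := by omega
      rw [dif_neg hlt]
      rw [if_pos (by rw [hng, hrlen])]
      refine ih _ _ _ hadj' hnd' hnone' (by simp only [List.length_append, List.length_singleton]; rw [hng]; push_cast; ring) ?_ ?_
      · intro m v hmv
        rw [PySem.Dict.get?_insert] at hmv
        by_cases hm : m = lbl
        · rw [if_pos hm] at hmv
          injection hmv with hv
          refine ⟨groups.length, by simp only [List.length_append, List.length_singleton]; omega, by omega, ?_⟩
          subst hm
          rw [List.getElem_concat_length rfl]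
          rw [PySem.Set.mem_ofList]
          simp
        · rw [if_neg hm] at hmv
          obtain ⟨j, hj, hv, hmm⟩ := inv1 m v hmv
          refine ⟨j, by simp only [List.length_append, List.length_singleton]; omega, hv, ?_⟩
          rw [List.getElem_append_left hj]
          exact hmm
      · intro j hj m hm
        simp only [List.length_append, List.length_singleton] at hj
        rw [PySem.Dict.get?_insert]
        by_cases hjl : j < groups.length
        · rw [List.getElem_append_left hjl] at hm
          have hmne : m ≠ lbl := fun h => hlblnot j hjl (h ▸ hm)
          rw [if_neg hmne]
          exact inv2 j hjl m hm
        · have hjeq : j = groups.length := by omega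
          subst hjeq
          rw [List.getElem_concat_length rfl] at hm
          have hml : m = lbl := by
            rw [PySem.Set.mem_ofList] at hm
            simpa using hm
          rw [if_pos hml, ← hrlen]

-- ===== VERDICT (by name: the statement is the Claim_ definition above) =====
theorem solve_spec : Claim_equal_solve := by
  intro matrix _
  unfold Spec_solve solve solve_alt
  rw [build_eq]
  have hkeys : (buildA matrix).keys.reverse = ((buildA matrix).items.reverse).map Prod.fst := by
    simp [PySem.Dict.keys]
  rw [hkeys]
  have h := loop_eq (buildA matrix) ((buildA matrix).items.reverse) [] PySem.Dict.empty 0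
    (by
      intro p hp
      exact PySem.Dict.get?_of_mem_items _ (List.mem_reverse.mp hp) (nodup_buildA matrix))
    (by
      have : ((buildA matrix).items.reverse.map Prod.fst) = (buildA matrix).keys.reverse := by
        simp [PySem.Dict.keys]
      rw [this]
      exact List.nodup_reverse.mpr (nodup_buildA matrix))
    (by intro p _; exact PySem.Dict.get?_empty _)
    (by simp)
    (by intro lbl v h; rw [PySem.Dict.get?_empty] at h; cases h)
    (by intro j h; simp at h)
  rw [← h]
  simp only [decide_eq_decide]
  omega
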